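-- pv_equiv track=rewrite | github.com/bmil-jnu/ADME-enhanced_multitask_prediction_of_microsomal_stability | Analysis/Edgeshaper/Dataset.py | _greedy_pack_scaffolds_to_folds
-- ===== SOURCE A (Python) =====
-- from typing import Optional, List, Tuple, Dict
--
-- def _greedy_pack_scaffolds_to_folds(scaffold_buckets: Dict[str, List[int]], n_splits: int) -> List[List[int]]:
--     """
--     Greedy packing:
--       - Sort scaffold groups by decreasing size (and key for tie-break)
--       - Assign each group to the fold with currently smallest size
--     """
--     groups = list(scaffold_buckets.items())
--     groups.sort(key=lambda kv: (-len(kv[1]), kv[0]))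
--
--     fold_bins = [[] for _ in range(n_splits)]
--     fold_sizes = [0] * n_splits
--
--     for _, idx_list in groups:
--         k = min(range(n_splits), key=lambda f: fold_sizes[f])
--         fold_bins[k].extend(idx_list)
--         fold_sizes[k] += len(idx_list)
--
--     return fold_bins
-- ===== SOURCE B (Python) =====
-- from typing import Optional, List, Tuple, Dict
--
-- def _greedy_pack_scaffolds_to_folds(scaffold_buckets: Dict[str, List[int]], n_splits: int) -> List[List[int]]:
--     """
--     Same greedy packing, but instead of re-scanning all fold sizes for the
--     minimum at every step, keep a list of (size, fold_index) pairs sorted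
--     ascending: pop the head (the smallest fold, lowest index on ties) and
--     re-insert it at its new sorted position.
--     """
--     groups = sorted(scaffold_buckets.items(), key=lambda kv: (-len(kv[1]), kv[0]))
--
--     fold_bins = [[] for _ in range(n_splits)]
--     entries = [(0, f) for f in range(n_splits)]  # sorted ascending by (size, fold)
--
--     for _, idx_list in groups:
--         size, k = entries.pop(0)
--         fold_bins[k].extend(idx_list)
--         item = (size + len(idx_list), k)
--         i = 0
--         while i < len(entries) and entries[i] <= item:
--             i += 1
--         entries.insert(i, item)
--
--     return fold_bins
-- ===== Notes on version B (the rewrite author's own statement) =====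
-- stated objective: alternative
-- what changed: Replaces A's full min-scan over all fold sizes at every group by a (size, fold_index) list kept sorted ascending: pop the head (smallest fold, lowest index on ties) and re-insert the grown fold at its new sorted position.
import Mathlib
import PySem

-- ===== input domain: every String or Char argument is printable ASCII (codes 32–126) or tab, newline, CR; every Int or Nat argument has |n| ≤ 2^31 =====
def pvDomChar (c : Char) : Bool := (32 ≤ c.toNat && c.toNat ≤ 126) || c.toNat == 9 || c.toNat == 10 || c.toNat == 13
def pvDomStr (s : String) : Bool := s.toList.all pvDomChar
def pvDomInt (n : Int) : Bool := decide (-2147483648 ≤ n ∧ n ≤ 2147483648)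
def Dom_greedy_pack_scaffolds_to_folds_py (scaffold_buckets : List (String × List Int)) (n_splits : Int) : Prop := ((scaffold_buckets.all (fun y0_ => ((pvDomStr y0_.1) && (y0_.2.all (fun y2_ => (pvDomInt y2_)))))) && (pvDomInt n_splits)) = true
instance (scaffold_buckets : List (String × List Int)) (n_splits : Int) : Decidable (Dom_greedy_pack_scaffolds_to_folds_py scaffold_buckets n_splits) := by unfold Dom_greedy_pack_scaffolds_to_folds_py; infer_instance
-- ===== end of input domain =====

-- B replaces A's per-group min-scan over all fold sizes by a (size, fold) list kept sorted
-- ascending: pop the head, re-insert at the new position (objective: alternative data structure).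

-- ===== PORT A =====
-- the 'for _, idx_list in groups' loop of A, carrying (fold_bins, fold_sizes)
def pvALoop (n : Int) : List (String × List Int) → List (List Int) → List Int → List (List Int)
  | [], bins, _ => bins
  | (_, idxs) :: rest, bins, sizes =>
    match PySem.List.min? (PySem.List.pyRange 0 n 1) (fun f => PySem.List.pyGetD sizes f 0) with
    | none => bins   -- min(range(n_splits)) raises ValueError here (n_splits ≤ 0); excluded by Pre_
    | some k =>
        pvALoop n rest (bins.set k.toNat (PySem.List.pyGetD bins k [] ++ idxs))
          (sizes.set k.toNat (PySem.List.pyGetD sizes k 0 + (idxs.length : Int)))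

def greedy_pack_scaffolds_to_folds_py (scaffold_buckets : List (String × List Int)) (n_splits : Int) : List (List Int) :=
  let groups := PySem.List.sorted2 (PySem.Dict.ofList scaffold_buckets).items
    (fun kv => -(kv.2.length : Int)) (fun kv => kv.1)
  pvALoop n_splits groups
    ((PySem.List.pyRange 0 n_splits 1).map (fun _ => []))
    (PySem.List.pyRepeat [(0 : Int)] n_splits)

-- ===== PORT B =====
-- the 'while i < len(entries) and entries[i] <= item: i += 1' scan (tuple <= is lexicographic)
def pvInsPos (item : Int × Int) : List (Int × Int) → Nat
  | [] => 0
  | e :: r => if e.1 < item.1 ∨ (e.1 = item.1 ∧ e.2 ≤ item.2) then pvInsPos item r + 1 else 0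

-- B's loop: 'entries.pop(0)' is the head pattern match ([] = IndexError, excluded by Pre_)
def pvBLoop : List (String × List Int) → List (List Int) → List (Int × Int) → List (List Int)
  | [], bins, _ => bins
  | (_, idxs) :: rest, bins, entries =>
    match entries with
    | [] => bins   -- entries.pop(0) raises IndexError here; excluded by Pre_
    | (size, k) :: es =>
        let item : Int × Int := (size + (idxs.length : Int), k)
        pvBLoop rest (bins.set k.toNat (PySem.List.pyGetD bins k [] ++ idxs))
          (PySem.List.insert es ((pvInsPos item es : Nat) : Int) item)

def greedy_pack_scaffolds_to_folds_py_alt (scaffold_buckets : List (String × List Int)) (n_splits : Int) : List (List Int) :=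
  let groups := PySem.List.sorted2 (PySem.Dict.ofList scaffold_buckets).items
    (fun kv => -(kv.2.length : Int)) (fun kv => kv.1)
  pvBLoop groups
    ((PySem.List.pyRange 0 n_splits 1).map (fun _ => []))
    ((PySem.List.pyRange 0 n_splits 1).map (fun f => ((0 : Int), f)))

-- ===== PRECONDITION & SPEC =====
-- With a non-empty dict and n_splits ≤ 0 the Python A raises ValueError (min of an empty range)
-- and the Python B raises IndexError (pop from an empty list); those inputs are excluded.
def Pre_greedy_pack_scaffolds_to_folds_py (scaffold_buckets : List (String × List Int)) (n_splits : Int) : Prop :=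
  scaffold_buckets = [] ∨ 1 ≤ n_splits
instance (scaffold_buckets : List (String × List Int)) (n_splits : Int) : Decidable (Pre_greedy_pack_scaffolds_to_folds_py scaffold_buckets n_splits) := by unfold Pre_greedy_pack_scaffolds_to_folds_py; infer_instance

def pvWitness_greedy_pack_scaffolds_to_folds_py : (List (String × List Int)) × Int := ([("a", [0, 1]), ("b", [2])], 2)

def Spec_greedy_pack_scaffolds_to_folds_py (scaffold_buckets : List (String × List Int)) (n_splits : Int) (out : List (List Int)) : Prop := out = greedy_pack_scaffolds_to_folds_py_alt scaffold_buckets n_splits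
instance (scaffold_buckets : List (String × List Int)) (n_splits : Int) (out : List (List Int)) : Decidable (Spec_greedy_pack_scaffolds_to_folds_py scaffold_buckets n_splits out) := by unfold Spec_greedy_pack_scaffolds_to_folds_py; infer_instance

-- ===== CLAIM (what is proved, stated in full; the proofs are below) =====
def Claim_equal_greedy_pack_scaffolds_to_folds_py : Prop := ∀ (scaffold_buckets : List (String × List Int)) (n_splits : Int), Dom_greedy_pack_scaffolds_to_folds_py scaffold_buckets n_splits → Pre_greedy_pack_scaffolds_to_folds_py scaffold_buckets n_splits → Spec_greedy_pack_scaffolds_to_folds_py scaffold_buckets n_splits (greedy_pack_scaffolds_to_folds_py scaffold_buckets n_splits)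

-- ===== LEMMAS AND PROOFS =====

-- lexicographic ≤ on (size, fold-index) pairs, Python's tuple <=
def pvLexLe (a b : Int × Int) : Prop := a.1 < b.1 ∨ (a.1 = b.1 ∧ a.2 ≤ b.2)

lemma pvLexLe_refl (a : Int × Int) : pvLexLe a a := by unfold pvLexLe; omega

lemma pvLexLe_trans {a b c : Int × Int} (h1 : pvLexLe a b) (h2 : pvLexLe b c) : pvLexLe a c := by
  unfold pvLexLe at *; omega

lemma pvLexLe_antisymm {a b : Int × Int} (h1 : pvLexLe a b) (h2 : pvLexLe b a) : a = b := by
  unfold pvLexLe at *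
  obtain ⟨a1, a2⟩ := a; obtain ⟨b1, b2⟩ := b
  simp only [Prod.mk.injEq]
  constructor <;> omega

-- the multiset of (size, index) pairs a fold_sizes list denotes
def pvPairsOf (sizes : List Int) : List (Int × Int) :=
  sizes.zipIdx.map (fun p => (p.1, (p.2 : Int)))

lemma pvPairsOf_length (sizes : List Int) : (pvPairsOf sizes).length = sizes.length := by
  simp [pvPairsOf]

lemma pvPairsOf_getElem (sizes : List Int) (i : Nat) (h : i < sizes.length) :
    (pvPairsOf sizes)[i]'(by simp [pvPairsOf_length, h]) = (sizes[i], (i : Int)) := by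
  simp [pvPairsOf]

lemma pvMem_pairsOf {sizes : List Int} {x : Int × Int} :
    x ∈ pvPairsOf sizes ↔ ∃ (i : Nat) (h : i < sizes.length), x = (sizes[i], (i : Int)) := by
  constructor
  · intro hx
    obtain ⟨i, hi, he⟩ := List.getElem_of_mem hx
    exact ⟨i, by simpa [pvPairsOf_length] using hi, by rw [← he, pvPairsOf_getElem]⟩
  · rintro ⟨i, h, rfl⟩
    rw [← pvPairsOf_getElem sizes i h]
    exact List.getElem_mem _

lemma pvPairsOf_set (sizes : List Int) (i : Nat) (v : Int) (h : i < sizes.length) :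
    pvPairsOf (sizes.set i v) = (pvPairsOf sizes).set i (v, (i : Int)) := by
  apply List.ext_getElem
  · simp [pvPairsOf_length]
  · intro j hj hj'
    rw [pvPairsOf_getElem _ j (by simpa [pvPairsOf_length] using hj)]
    rcases eq_or_ne j i with rfl | hne
    · simp [List.getElem_set_self]
    · rw [List.getElem_set_ne (by omega), List.getElem_set_ne (by omega),
        pvPairsOf_getElem _ j (by simpa [pvPairsOf_length] using hj')]

-- A's min(range(n), key=…) is a foldl of this step function
def pvMinStep (key : Int → Int) : Option Int → Int → Option Int :=
  fun acc x => match acc with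
    | none => some x
    | some m => if key x < key m then some x else some m

-- starting from some m0 it returns the lexicographically least (key, index) pair
-- (ties to the earliest index)
lemma pvFoldlMinLex (key : Int → Int) :
    ∀ (xs : List Int) (m0 : Int), xs.Pairwise (· < ·) → (∀ x ∈ xs, m0 < x) →
    ∃ m', xs.foldl (pvMinStep key) (some m0) = some m'
      ∧ (m' = m0 ∨ m' ∈ xs)
      ∧ pvLexLe (key m', m') (key m0, m0)
      ∧ ∀ y ∈ xs, pvLexLe (key m', m') (key y, y) := by
  intro xs
  induction xs with
  | nil =>
      intro m0 _ _
      exact ⟨m0, rfl, Or.inl rfl, pvLexLe_refl _, by simp⟩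
  | cons x t ih =>
      intro m0 hpw hlt
      have hpt : t.Pairwise (· < ·) := hpw.of_cons
      have hxt : ∀ z ∈ t, x < z := fun z hz => List.rel_of_pairwise_cons hpw hz
      have hmx : m0 < x := hlt x (List.mem_cons_self)
      simp only [List.foldl_cons]
      by_cases hkey : key x < key m0
      · rw [show pvMinStep key (some m0) x = some x by simp [pvMinStep, hkey]]
        obtain ⟨m', he, hmem, hle, hall⟩ := ih x hpt hxt
        refine ⟨m', he, ?_, ?_, ?_⟩
        · rcases hmem with rfl | h; · exact Or.inr List.mem_cons_self
          · exact Or.inr (List.mem_cons_of_mem _ h)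
        · exact pvLexLe_trans hle (Or.inl hkey)
        · intro y hy
          rcases List.mem_cons.mp hy with rfl | hy'
          · exact hle
          · exact hall y hy'
      · rw [show pvMinStep key (some m0) x = some m0 by simp [pvMinStep, hkey]]
        obtain ⟨m', he, hmem, hle, hall⟩ := ih m0 hpt (fun z hz => lt_trans hmx (hxt z hz))
        refine ⟨m', he, ?_, hle, ?_⟩
        · rcases hmem with rfl | h; · exact Or.inl rfl
          · exact Or.inr (List.mem_cons_of_mem _ h)
        · intro y hy
          rcases List.mem_cons.mp hy with rfl | hy'
          · refine pvLexLe_trans hle ?_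
            unfold pvLexLe
            simp only
            omega
          · exact hall y hy'

lemma pvMin?_eq_foldl (xs : List Int) (key : Int → Int) :
    PySem.List.min? xs key = xs.foldl (pvMinStep key) none := by
  rw [PySem.List.min?]
  apply PySem.List.foldl_congr_mem
  intro acc x _
  cases acc <;> rfl

lemma pvMinRangeLex (n : Int) (hn : 0 < n) (key : Int → Int) :
    ∃ k, PySem.List.min? (PySem.List.pyRange 0 n 1) key = some k ∧ 0 ≤ k ∧ k < n ∧
      ∀ j, 0 ≤ j → j < n → pvLexLe (key k, k) (key j, j) := by
  rw [pvMin?_eq_foldl, PySem.List.pyRange_one_cons hn]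
  simp only [List.foldl_cons, zero_add]
  rw [show pvMinStep key none 0 = some 0 from rfl]
  obtain ⟨k, he, hmem, hle, hall⟩ := pvFoldlMinLex key (PySem.List.pyRange 1 n 1) 0
    (PySem.List.pairwise_lt_pyRange_one 1 n)
    (fun x hx => ((PySem.List.mem_pyRange_one).mp hx).1)
  refine ⟨k, he, ?_, ?_, ?_⟩
  · rcases hmem with rfl | h; · exact le_refl 0
    · have := (PySem.List.mem_pyRange_one).mp h; omega
  · rcases hmem with rfl | h; · exact hn
    · exact ((PySem.List.mem_pyRange_one).mp h).2
  · intro j h0 hj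
    rcases eq_or_lt_of_le h0 with rfl | h1
    · exact hle
    · exact hall j ((PySem.List.mem_pyRange_one).mpr ⟨h1, hj⟩)

-- B's insertion: position bound, take/drop form, permutation, sortedness
lemma pvInsPos_le_length (item : Int × Int) (es : List (Int × Int)) : pvInsPos item es ≤ es.length := by
  induction es with
  | nil => simp [pvInsPos]
  | cons e r ih =>
      simp only [pvInsPos, List.length_cons]
      split <;> omega

lemma pvInsert_eq (item : Int × Int) (es : List (Int × Int)) :
    PySem.List.insert es ((pvInsPos item es : Nat) : Int) item =
      es.take (pvInsPos item es) ++ item :: es.drop (pvInsPos item es) :=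
  PySem.List.insert_natCast es (pvInsPos item es) item (pvInsPos_le_length item es)

lemma pvInsert_perm (item : Int × Int) (es : List (Int × Int)) :
    (PySem.List.insert es ((pvInsPos item es : Nat) : Int) item).Perm (item :: es) := by
  rw [pvInsert_eq]
  calc (es.take (pvInsPos item es) ++ item :: es.drop (pvInsPos item es)).Perm
        (item :: (es.take (pvInsPos item es) ++ es.drop (pvInsPos item es))) := List.perm_middle
    _ = (item :: es) := by rw [List.take_append_drop]

lemma pvInsert_pairwise (item : Int × Int) (es : List (Int × Int)) (h : es.Pairwise pvLexLe) :
    (PySem.List.insert es ((pvInsPos item es : Nat) : Int) item).Pairwise pvLexLe := by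
  rw [pvInsert_eq]
  induction es with
  | nil => simp [pvInsPos]
  | cons e r ih =>
      by_cases hc : e.1 < item.1 ∨ (e.1 = item.1 ∧ e.2 ≤ item.2)
      · simp only [pvInsPos, if_pos hc, List.take_succ_cons, List.drop_succ_cons, List.cons_append]
        rw [List.pairwise_cons]
        refine ⟨?_, ih h.of_cons⟩
        intro y hy
        have hmem : y = item ∨ y ∈ r := by
          have := (List.mem_append.mp hy)
          rcases this with h1 | h1
          · exact Or.inr (List.mem_of_mem_take h1)
          · rcases List.mem_cons.mp h1 with rfl | h2
            · exact Or.inl rfl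
            · exact Or.inr (List.mem_of_mem_drop h2)
        rcases hmem with rfl | hmem
        · exact hc
        · exact (List.rel_of_pairwise_cons h) hmem
      · simp only [pvInsPos, if_neg hc, List.take_zero, List.drop_zero, List.nil_append]
        rw [List.pairwise_cons]
        refine ⟨?_, h⟩
        intro y hy
        have hie : pvLexLe item e := by unfold pvLexLe; unfold pvLexLe at hc; omega
        rcases List.mem_cons.mp hy with rfl | hy'
        · exact hie
        · exact pvLexLe_trans hie ((List.rel_of_pairwise_cons h) hy')

-- l.set i v is, up to permutation, v :: (l with index i removed)
lemma pvSet_perm {α : Type} (l : List α) (i : Nat) (v : α) (h : i < l.length) :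
    (l.set i v).Perm (v :: l.eraseIdx i) := by
  rw [List.set_eq_take_append_cons_drop, if_pos h, List.eraseIdx_eq_take_drop_succ]
  exact List.perm_middle

lemma pvSelf_perm_eraseIdx {α : Type} (l : List α) (i : Nat) (h : i < l.length) :
    l.Perm (l[i] :: l.eraseIdx i) := by
  conv_lhs => rw [← List.take_append_drop i l, List.drop_eq_getElem_cons h]
  rw [List.eraseIdx_eq_take_drop_succ]
  exact List.perm_middle

-- THE CORE LOOP EQUIVALENCE
lemma pvLoopEq (n : Int) (hn : 0 < n) :
    ∀ (groups : List (String × List Int)) (bins : List (List Int))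
      (sizes : List Int) (entries : List (Int × Int)),
      sizes.length = n.toNat →
      entries.Perm (pvPairsOf sizes) →
      entries.Pairwise pvLexLe →
      pvALoop n groups bins sizes = pvBLoop groups bins entries := by
  intro groups
  induction groups with
  | nil => intro bins sizes entries _ _ _; rfl
  | cons g rest ih =>
      obtain ⟨name, idxs⟩ := g
      intro bins sizes entries hlen hperm hpw
      -- the A side: first argmin kA over range(n)
      obtain ⟨kA, heA, hk0, hkn, hminA⟩ :=
        pvMinRangeLex n hn (fun f => PySem.List.pyGetD sizes f 0)
      -- entries is non-empty
      have hlenE : entries.length = sizes.length := by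
        rw [hperm.length_eq, pvPairsOf_length]
      have hne : entries ≠ [] := by
        intro h; rw [h] at hlenE; simp at hlenE; omega
      obtain ⟨⟨s, k⟩, es, rfl⟩ : ∃ h t, entries = h :: t := by
        cases entries with
        | nil => exact absurd rfl hne
        | cons h t => exact ⟨h, t, rfl⟩
      -- the head is in pvPairsOf sizes: s = sizes[k], 0 ≤ k < n
      have hheadmem : (s, k) ∈ pvPairsOf sizes := hperm.mem_iff.mp List.mem_cons_self
      obtain ⟨i, hi, hie⟩ := pvMem_pairsOf.mp hheadmem
      have hs : s = sizes[i] := congrArg Prod.fst hie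
      have hki : k = (i : Int) := congrArg Prod.snd hie
      have hk0' : 0 ≤ k := by omega
      have hkn' : k < n := by omega
      -- head is lex-minimal among entries
      have hminB : ∀ y ∈ (s, k) :: es, pvLexLe (s, k) y := by
        intro y hy
        rcases List.mem_cons.mp hy with rfl | hy'
        · exact pvLexLe_refl _
        · exact (List.rel_of_pairwise_cons hpw) hy'
      -- pyGetD at a nonnegative index is getD
      have hget : ∀ (j : Int), 0 ≤ j → PySem.List.pyGetD sizes j 0 = sizes.getD j.toNat 0 := by
        intro j h0
        have hje : j = ((j.toNat : Nat) : Int) := by omega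
        conv_lhs => rw [hje]
        rw [PySem.List.pyGetD_natCast]
      have hgk : PySem.List.pyGetD sizes k 0 = s := by
        rw [hget k hk0', show k.toNat = i by omega, List.getD_eq_getElem _ _ hi, ← hs]
      -- kA's pair is a member of entries
      have hkA_pair_mem : (PySem.List.pyGetD sizes kA 0, kA) ∈ (s, k) :: es := by
        apply hperm.mem_iff.mpr
        refine pvMem_pairsOf.mpr ⟨kA.toNat, by omega, ?_⟩
        rw [hget kA hk0, List.getD_eq_getElem _ _ (by omega), Int.toNat_of_nonneg hk0]
      -- the two chosen pairs coincide
      have hAB : (PySem.List.pyGetD sizes kA 0, kA) = (s, k) := by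
        apply pvLexLe_antisymm
        · have := hminA k hk0' hkn'
          rwa [hgk] at this
        · exact hminB _ hkA_pair_mem
      have hkAk : kA = k := congrArg Prod.snd hAB
      have hgA : PySem.List.pyGetD sizes kA 0 = s := by rw [hkAk, hgk]
      -- unfold one step of each loop
      rw [pvALoop, pvBLoop, heA]
      simp only [hkAk, hgk]
      -- recurse with the updated state
      set item : Int × Int := (s + (idxs.length : Int), k) with hitem
      apply ih
      · simp [List.length_set, hlen]
      · -- permutation invariant
        have h1 : (PySem.List.insert es ((pvInsPos item es : Nat) : Int) item).Perm (item :: es) :=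
          pvInsert_perm item es
        have h2 : pvPairsOf (sizes.set k.toNat (s + (idxs.length : Int)))
            = (pvPairsOf sizes).set k.toNat item := by
          rw [pvPairsOf_set _ _ _ (by omega), hitem,
            show ((k.toNat : Nat) : Int) = k from by omega]
        rw [h2]
        have hgE : (pvPairsOf sizes)[k.toNat]'(by rw [pvPairsOf_length]; omega) = (s, k) := by
          rw [pvPairsOf_getElem _ _ (by omega)]
          rw [show (sizes[k.toNat]'(by omega) : Int) = s from by rw [hs]; congr 1; omega]
          rw [show ((k.toNat : Nat) : Int) = k from by omega]
        have h3 : (pvPairsOf sizes).Perm ((s, k) :: (pvPairsOf sizes).eraseIdx k.toNat) := by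
          have := pvSelf_perm_eraseIdx (pvPairsOf sizes) k.toNat (by rw [pvPairsOf_length]; omega)
          rwa [hgE] at this
        have h4 : es.Perm ((pvPairsOf sizes).eraseIdx k.toNat) :=
          (hperm.trans h3).cons_inv
        have h5 : ((pvPairsOf sizes).set k.toNat item).Perm
            (item :: (pvPairsOf sizes).eraseIdx k.toNat) :=
          pvSet_perm _ _ _ (by rw [pvPairsOf_length]; omega)
        exact h1.trans ((List.Perm.cons item h4).trans h5.symm)
      · exact pvInsert_pairwise item es hpw.of_cons

-- initial state: the entries list is exactly pvPairsOf of the zero sizes list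
lemma pvInit_pairs (n : Int) :
    ((PySem.List.pyRange 0 n 1).map (fun f => ((0 : Int), f))) =
      pvPairsOf (PySem.List.pyRepeat [(0 : Int)] n) := by
  rw [PySem.List.pyRepeat_singleton]
  apply List.ext_getElem
  · simp [pvPairsOf_length, PySem.List.length_pyRange_one]
  · intro i h1 h2
    have hi : i < n.toNat := by simpa [pvPairsOf_length] using h2
    rw [pvPairsOf_getElem _ i (by simpa using hi)]
    simp [PySem.List.getElem_pyRange_one]

lemma pvInit_pairwise (n : Int) :
    (((PySem.List.pyRange 0 n 1).map (fun f => ((0 : Int), f)))).Pairwise pvLexLe := by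
  rw [List.pairwise_map]
  apply (PySem.List.pairwise_lt_pyRange_one 0 n).imp
  intro a b hab
  exact Or.inr ⟨rfl, le_of_lt hab⟩

-- ===== VERDICT (by name: the statement is the Claim_ definition above) =====
theorem greedy_pack_scaffolds_to_folds_py_spec : Claim_equal_greedy_pack_scaffolds_to_folds_py := by
  intro sb n _ hpre
  unfold Spec_greedy_pack_scaffolds_to_folds_py
  rcases hpre with rfl | hn
  · rfl
  · unfold greedy_pack_scaffolds_to_folds_py greedy_pack_scaffolds_to_folds_py_alt
    apply pvLoopEq n (by omega)
    · simp [PySem.List.pyRepeat_singleton]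
    · rw [pvInit_pairs n]
    · exact pvInit_pairwise n
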